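-- pv_equiv track=rewrite | github.com/rebuilder945/FL_research | ast_research/python_code_5.23/lastterm_page10/success_code/陈铠-2796-2023-05-30_21_55_32.py | find_longest_digits_substring
-- ===== SOURCE A (Python) =====
-- def find_longest_digits_substring(string):
--     max_digits = ""
--     current_digits = ""
--     for char in string:
--         if char.isdigit():
--             current_digits += char
--         elif current_digits:
--             if len(current_digits) > len(max_digits):
--                 max_digits = current_digits
--             current_digits = ""
--     if max_digits:
--         return max_digits
--     else:
--         return "No digits"
-- ===== SOURCE B (Python) =====
-- def find_longest_digits_substring(string):
--     # Collect every maximal digit run (including a run that reaches the end of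
--     # the string), then pick the longest; A ignores a trailing run, B counts it.
--     runs = []
--     i, n = 0, len(string)
--     while i < n:
--         if string[i].isdigit():
--             j = i + 1
--             while j < n and string[j].isdigit():
--                 j += 1
--             runs.append(string[i:j])
--             i = j
--         else:
--             i += 1
--     return max(runs, key=len) if runs else "No digits"
-- ===== Notes on version B (the rewrite author's own statement) =====
-- stated objective: alternative
-- what changed: B collects every maximal digit run with an index scan (slicing whole runs off at once) and then reduces once with max(key=len), instead of A's char-by-char running-max/current-run state machine; B also counts a run that reaches the end of the string, which A silently drops.
-- intended difference: On strings whose trailing digit run (cut off only by the end of the string) is strictly longer than every digit run followed by a non-digit, A ignores that trailing run and returns a shorter run or 'No digits', while B returns the trailing run, which is the actual longest digits substring. — e.g. on find_longest_digits_substring("7a99"): A returns "7", B returns "99"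
import Mathlib
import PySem

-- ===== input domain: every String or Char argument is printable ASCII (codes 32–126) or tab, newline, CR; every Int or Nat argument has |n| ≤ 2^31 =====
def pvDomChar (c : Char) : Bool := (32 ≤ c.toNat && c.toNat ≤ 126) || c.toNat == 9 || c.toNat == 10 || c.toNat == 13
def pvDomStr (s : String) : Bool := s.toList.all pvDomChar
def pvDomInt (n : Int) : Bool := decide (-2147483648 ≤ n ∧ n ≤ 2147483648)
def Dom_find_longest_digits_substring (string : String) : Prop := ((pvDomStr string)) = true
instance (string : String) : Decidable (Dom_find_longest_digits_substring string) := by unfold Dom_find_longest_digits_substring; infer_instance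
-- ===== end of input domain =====

-- B collects every maximal digit run (including a trailing one) and reduces with max(key=len);
-- A drops a run that reaches the end of the string — that intended difference is stated as D_ below.

-- ===== PORT A =====
-- the for-loop of A: state (max_digits, current_digits), char by char
def pvLoopA : List Char → List Char → List Char → List Char
  | maxd, _cur, [] => maxd
  | maxd, cur, c :: cs =>
    if PySem.Chars.isdigit c then pvLoopA maxd (cur ++ [c]) cs
    else if cur = [] then pvLoopA maxd cur cs
    else if maxd.length < cur.length then pvLoopA cur [] cs
    else pvLoopA maxd [] cs

def find_longest_digits_substring (string : String) : String :=
  let r := pvLoopA [] [] string.toList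
  if r = [] then "No digits" else String.ofList r

-- ===== PORT B =====
-- outer while of Source B: skip a non-digit, or slice off a whole maximal digit run (the inner while = takeWhile/dropWhile)
def pvRunsB : List Char → List (List Char)
  | [] => []
  | c :: cs =>
    if PySem.Chars.isdigit c then
      (c :: cs.takeWhile PySem.Chars.isdigit) :: pvRunsB (cs.dropWhile PySem.Chars.isdigit)
    else pvRunsB cs
termination_by l => l.length
decreasing_by
  · simpa using Nat.lt_succ_of_le (cs.length_dropWhile_le PySem.Chars.isdigit)
  · simp

def find_longest_digits_substring_alt (string : String) : String :=
  match PySem.List.max? (pvRunsB string.toList) (fun r => r.length) with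
  | some m => String.ofList m
  | none => "No digits"

-- ===== PRECONDITION & SPEC =====
-- On strings whose trailing digit run (cut off only by the end of the string) is strictly longer
-- than every digit run followed by a non-digit, A ignores that trailing run and returns a shorter
-- run or "No digits", while B returns the trailing run, which is the actual longest digits substring.
def D_find_longest_digits_substring (string : String) : Prop :=
  0 < (string.toList.reverse.takeWhile PySem.Chars.isdigit).length ∧
  ∀ j, (h : j < string.toList.length) → PySem.Chars.isdigit string.toList[j] = false →
    ((string.toList.take j).reverse.takeWhile PySem.Chars.isdigit).length <
      (string.toList.reverse.takeWhile PySem.Chars.isdigit).length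

instance (string : String) : Decidable (D_find_longest_digits_substring string) := by
  unfold D_find_longest_digits_substring; infer_instance

def Spec_find_longest_digits_substring (string : String) (out : String) : Prop :=
  ¬ D_find_longest_digits_substring string → out = find_longest_digits_substring_alt string
instance (string : String) (out : String) : Decidable (Spec_find_longest_digits_substring string out) := by
  unfold Spec_find_longest_digits_substring; infer_instance

def pvDiffWitness_find_longest_digits_substring : String := "7a99"
def pvDiffWitnessOut_find_longest_digits_substring : String × String := ("7", "99")

-- ===== CLAIM (what is proved, stated in full; the proofs are below) =====
def Claim_unchanged_find_longest_digits_substring : Prop := ∀ (string : String), Dom_find_longest_digits_substring string → Spec_find_longest_digits_substring string (find_longest_digits_substring string)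
def Claim_changed_find_longest_digits_substring : Prop := Dom_find_longest_digits_substring (pvDiffWitness_find_longest_digits_substring) ∧ D_find_longest_digits_substring (pvDiffWitness_find_longest_digits_substring) ∧ find_longest_digits_substring (pvDiffWitness_find_longest_digits_substring) = pvDiffWitnessOut_find_longest_digits_substring.1 ∧ find_longest_digits_substring_alt (pvDiffWitness_find_longest_digits_substring) = pvDiffWitnessOut_find_longest_digits_substring.2 ∧ pvDiffWitnessOut_find_longest_digits_substring.1 ≠ pvDiffWitnessOut_find_longest_digits_substring.2
def Claim_exact_find_longest_digits_substring : Prop := ∀ (string : String), Dom_find_longest_digits_substring string → D_find_longest_digits_substring string → find_longest_digits_substring string ≠ find_longest_digits_substring_alt string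

-- ===== LEMMAS AND PROOFS =====

-- the maximal digit runs of (cur ++ xs) that are terminated by a non-digit, cur the open run so far
def termRuns : List Char → List Char → List (List Char)
  | _cur, [] => []
  | cur, c :: cs =>
    if PySem.Chars.isdigit c then termRuns (cur ++ [c]) cs
    else if cur = [] then termRuns [] cs
    else cur :: termRuns [] cs

-- the open digit run at the end of (cur ++ xs)
def tailRun : List Char → List Char → List Char
  | cur, [] => cur
  | cur, c :: cs => if PySem.Chars.isdigit c then tailRun (cur ++ [c]) cs else tailRun [] cs

-- all maximal digit runs, accumulator form
def runsAcc : List Char → List Char → List (List Char)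
  | cur, [] => if cur = [] then [] else [cur]
  | cur, c :: cs =>
    if PySem.Chars.isdigit c then runsAcc (cur ++ [c]) cs
    else if cur = [] then runsAcc [] cs
    else cur :: runsAcc [] cs

-- A's running-max fold
def bestF (maxd : List Char) (rs : List (List Char)) : List Char :=
  rs.foldl (fun m r => if m.length < r.length then r else m) maxd

theorem lemA (xs : List Char) : ∀ maxd cur, pvLoopA maxd cur xs = bestF maxd (termRuns cur xs) := by
  induction xs with
  | nil => intro maxd cur; rfl
  | cons c cs ih =>
    intro maxd cur
    by_cases hd : PySem.Chars.isdigit c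
    · simp [pvLoopA, termRuns, hd, ih]
    · by_cases hc : cur = []
      · simp [pvLoopA, termRuns, hd, hc, ih]
      · by_cases hlt : maxd.length < cur.length
        · simp [pvLoopA, termRuns, bestF, hd, hc, hlt, ih]
        · simp [pvLoopA, termRuns, bestF, hd, hc, hlt, ih]

theorem lemR2 (cs : List Char) : ∀ cur : List Char, cur ≠ [] →
    runsAcc cur cs = (cur ++ cs.takeWhile PySem.Chars.isdigit) :: runsAcc [] (cs.dropWhile PySem.Chars.isdigit) := by
  induction cs with
  | nil => intro cur h; simp [runsAcc, h]
  | cons c cs ih =>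
    intro cur h
    by_cases hd : PySem.Chars.isdigit c
    · simp [runsAcc, hd, ih (cur ++ [c]) (by simp)]
    · simp [runsAcc, hd, h]

theorem lemR1 (xs : List Char) : pvRunsB xs = runsAcc [] xs := by
  induction xs using pvRunsB.induct with
  | case1 => simp [pvRunsB, runsAcc]
  | case2 c cs hd ih =>
    simp only [pvRunsB, runsAcc, if_pos hd, List.nil_append]
    rw [lemR2 cs [c] (by simp), ih]
    simp
  | case3 c cs hd ih =>
    simp [pvRunsB, runsAcc, hd, ih]

theorem lemE (xs : List Char) : ∀ cur, runsAcc cur xs =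
    termRuns cur xs ++ (if tailRun cur xs = [] then [] else [tailRun cur xs]) := by
  induction xs with
  | nil => intro cur; by_cases h : cur = [] <;> simp [runsAcc, termRuns, tailRun, h]
  | cons c cs ih =>
    intro cur
    by_cases hd : PySem.Chars.isdigit c
    · simp [runsAcc, termRuns, tailRun, hd, ih]
    · by_cases hc : cur = [] <;> simp [runsAcc, termRuns, tailRun, hd, hc, ih]

theorem lemNE (xs : List Char) : ∀ cur r, r ∈ termRuns cur xs → r ≠ [] := by
  induction xs with
  | nil => intro cur r h; simp [termRuns] at h
  | cons c cs ih =>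
    intro cur r h
    by_cases hd : PySem.Chars.isdigit c
    · exact ih _ r (by simpa [termRuns, hd] using h)
    · by_cases hc : cur = []
      · exact ih _ r (by simpa [termRuns, hd, hc] using h)
      · rcases (by simpa [termRuns, hd, hc] using h : r = cur ∨ r ∈ termRuns [] cs) with h1 | h1
        · simpa [h1] using hc
        · exact ih _ r h1

theorem lemL2 (l1 l2 : List Char) (c : Char) (hc : PySem.Chars.isdigit c = false) :
    (l1 ++ c :: l2).reverse.takeWhile PySem.Chars.isdigit = l2.reverse.takeWhile PySem.Chars.isdigit := by
  have h1 : (l1 ++ c :: l2).reverse = l2.reverse ++ (c :: l1.reverse) := by simp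
  rw [h1, List.takeWhile_append]
  split
  · next hlen =>
    have hp := (List.takeWhile_prefix (l := l2.reverse) PySem.Chars.isdigit).eq_of_length hlen
    simp [hc, hp]
  · rfl

theorem takeWhile_all {l : List Char} {p : Char → Bool} (h : l.all p) : l.takeWhile p = l := by
  induction l with
  | nil => rfl
  | cons a t ih => simp_all

theorem lemTL (xs : List Char) : ∀ cur, cur.all PySem.Chars.isdigit →
    tailRun cur xs = ((cur ++ xs).reverse.takeWhile PySem.Chars.isdigit).reverse := by
  induction xs with
  | nil =>
    intro cur hcur
    have : cur.reverse.all PySem.Chars.isdigit := by simpa using hcur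
    simp [tailRun, takeWhile_all this]
  | cons c cs ih =>
    intro cur hcur
    by_cases hd : PySem.Chars.isdigit c
    · have : (cur ++ c :: cs) = (cur ++ [c]) ++ cs := by simp
      rw [this, ← ih (cur ++ [c]) (by simp [hcur, hd])]
      simp [tailRun, hd]
    · rw [show tailRun cur (c :: cs) = tailRun [] cs by simp [tailRun, hd],
        ih [] (by simp), lemL2 cur cs c (by simpa using hd)]
      simp

theorem lemTD (xs : List Char) : ∀ cur, cur.all PySem.Chars.isdigit →
    (tailRun cur xs).all PySem.Chars.isdigit := by
  induction xs with
  | nil => intro cur hcur; simpa [tailRun] using hcur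
  | cons c cs ih =>
    intro cur hcur
    by_cases hd : PySem.Chars.isdigit c
    · simpa [tailRun, hd] using ih (cur ++ [c]) (by simp [hcur, hd])
    · simpa [tailRun, hd] using ih [] (by simp)

theorem lemN1 (xs : List Char) : ∀ cur, cur.all PySem.Chars.isdigit →
    ∀ j, (h : j < xs.length) → PySem.Chars.isdigit xs[j] = false →
    0 < ((cur ++ xs.take j).reverse.takeWhile PySem.Chars.isdigit).length →
    ∃ r ∈ termRuns cur xs, r.length = ((cur ++ xs.take j).reverse.takeWhile PySem.Chars.isdigit).length := by
  induction xs with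
  | nil => intro cur _ j h; simp at h
  | cons c cs ih =>
    intro cur hcur j h hj hpos
    match j with
    | 0 =>
      have hc0 : PySem.Chars.isdigit c = false := by simpa using hj
      have hrev : cur.reverse.all PySem.Chars.isdigit := by simpa using hcur
      have htw : ((cur ++ (c :: cs).take 0).reverse.takeWhile PySem.Chars.isdigit) = cur.reverse := by
        simp only [List.take_zero, List.append_nil]
        exact takeWhile_all hrev
      have hcur_ne : cur ≠ [] := by
        intro hnil; rw [htw, hnil] at hpos; simp at hpos
      refine ⟨cur, ?_, by simp [takeWhile_all hrev]⟩
      simp [termRuns, hc0, hcur_ne]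
    | j + 1 =>
      have hstep : ((c :: cs).take (j + 1)) = c :: cs.take j := by simp
      by_cases hd : PySem.Chars.isdigit c
      · have hassoc : cur ++ c :: cs.take j = (cur ++ [c]) ++ cs.take j := by simp
        rw [hstep, hassoc] at hpos ⊢
        have h2 : j < cs.length := by simpa using h
        have hj' : PySem.Chars.isdigit cs[j] = false := by simpa using hj
        obtain ⟨r, hr, hl⟩ := ih (cur ++ [c]) (by simp [hcur, hd]) j h2 hj' hpos
        exact ⟨r, by simpa [termRuns, hd] using hr, hl⟩
      · have hrw : ((cur ++ (c :: cs).take (j + 1)).reverse.takeWhile PySem.Chars.isdigit)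
            = (([] ++ cs.take j).reverse.takeWhile PySem.Chars.isdigit) := by
          rw [hstep, lemL2 cur (cs.take j) c (by simpa using hd)]; simp
        rw [hrw] at hpos ⊢
        have h2 : j < cs.length := by simpa using h
        have hj' : PySem.Chars.isdigit cs[j] = false := by simpa using hj
        obtain ⟨r, hr, hl⟩ := ih [] (by simp) j h2 hj' hpos
        refine ⟨r, ?_, hl⟩
        by_cases hc : cur = [] <;> simp [termRuns, hd, hc, hr]

theorem lemN2 (xs : List Char) : ∀ cur, cur.all PySem.Chars.isdigit →
    ∀ r ∈ termRuns cur xs, ∃ j, ∃ h : j < xs.length, PySem.Chars.isdigit xs[j] = false ∧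
      r.length = ((cur ++ xs.take j).reverse.takeWhile PySem.Chars.isdigit).length := by
  induction xs with
  | nil => intro cur _ r hr; simp [termRuns] at hr
  | cons c cs ih =>
    intro cur hcur r hr
    by_cases hd : PySem.Chars.isdigit c
    · obtain ⟨j, h, hj, hl⟩ := ih (cur ++ [c]) (by simp [hcur, hd]) r (by simpa [termRuns, hd] using hr)
      refine ⟨j + 1, by simpa using h, by simpa using hj, ?_⟩
      rw [show ((c :: cs).take (j + 1)) = c :: cs.take j by simp,
        show cur ++ c :: cs.take j = (cur ++ [c]) ++ cs.take j by simp]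
      exact hl
    · have lift : ∀ r' ∈ termRuns [] cs, ∃ j, ∃ h : j < (c :: cs).length,
          PySem.Chars.isdigit (c :: cs)[j] = false ∧
          r'.length = ((cur ++ (c :: cs).take j).reverse.takeWhile PySem.Chars.isdigit).length := by
        intro r' hr'
        obtain ⟨j, h, hj, hl⟩ := ih [] (by simp) r' hr'
        have h' : j + 1 < (c :: cs).length := by simpa using h
        refine ⟨j + 1, h', by simpa using hj, ?_⟩
        rw [show ((c :: cs).take (j + 1)) = c :: cs.take j by simp,
          lemL2 cur (cs.take j) c (by simpa using hd)]
        simpa using hl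
      by_cases hc : cur = []
      · exact lift r (by simpa [termRuns, hd, hc] using hr)
      · rcases (by simpa [termRuns, hd, hc] using hr : r = cur ∨ r ∈ termRuns [] cs) with h1 | h1
        · refine ⟨0, by simp, by simpa using hd, ?_⟩
          have hrev : cur.reverse.all PySem.Chars.isdigit := by simpa using hcur
          simp [h1, takeWhile_all hrev]
        · exact lift r h1

theorem lem_best_ge (rs : List (List Char)) : ∀ maxd, maxd.length ≤ (bestF maxd rs).length ∧
    ∀ r ∈ rs, r.length ≤ (bestF maxd rs).length := by
  induction rs with
  | nil => intro maxd; simp [bestF]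
  | cons a t ih =>
    intro maxd
    by_cases hma : maxd.length < a.length
    · have step2 : bestF maxd (a :: t) = bestF a t := by
        show bestF (if maxd.length < a.length then a else maxd) t = _; rw [if_pos hma]
      obtain ⟨h1, h2⟩ := ih a
      refine ⟨by rw [step2]; omega, ?_⟩
      intro r hr
      rcases List.mem_cons.mp hr with h | h
      · rw [step2, h]; exact h1
      · rw [step2]; exact h2 r h
    · have step2 : bestF maxd (a :: t) = bestF maxd t := by
        show bestF (if maxd.length < a.length then a else maxd) t = _; rw [if_neg hma]
      obtain ⟨h1, h2⟩ := ih maxd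
      refine ⟨by rw [step2]; omega, ?_⟩
      intro r hr
      rcases List.mem_cons.mp hr with h | h
      · rw [step2, h]; omega
      · rw [step2]; exact h2 r h

theorem lem_best_mem (rs : List (List Char)) : ∀ maxd, bestF maxd rs = maxd ∨ bestF maxd rs ∈ rs := by
  induction rs with
  | nil => intro maxd; simp [bestF]
  | cons a t ih =>
    intro maxd
    have step : bestF maxd (a :: t) = bestF (if maxd.length < a.length then a else maxd) t := rfl
    rcases ih (if maxd.length < a.length then a else maxd) with h | h
    · rw [step, h]; by_cases hma : maxd.length < a.length
      · rw [if_pos hma]; simp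
      · rw [if_neg hma]; simp
    · right; rw [step]; exact List.mem_cons_of_mem _ h

theorem lemM' (rs : List (List Char)) (hne : ∀ r ∈ rs, r ≠ []) :
    PySem.List.max? rs (fun r => r.length) =
      if rs = [] then none else some (bestF [] rs) := by
  match rs with
  | [] => rfl
  | r0 :: rest =>
    have h0 : r0 ≠ [] := hne r0 (by simp)
    have hb : bestF [] (r0 :: rest) = bestF r0 rest := by
      have : bestF [] (r0 :: rest) = bestF (if ([] : List Char).length < r0.length then r0 else []) rest := rfl
      rw [this, if_pos (by simpa using List.length_pos_of_ne_nil h0)]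
    rw [hb, if_neg (by simp)]
    show List.foldl _ (some r0) rest = _
    clear h0 hb hne
    induction rest generalizing r0 with
    | nil => rfl
    | cons a t ih =>
      have hstep : bestF r0 (a :: t) = bestF (if r0.length < a.length then a else r0) t := rfl
      rw [hstep]
      show List.foldl _ (if r0.length < a.length then some a else some r0) t = _
      by_cases hc : r0.length < a.length
      · rw [if_pos hc, if_pos hc]; exact ih a
      · rw [if_neg hc, if_neg hc]; exact ih r0

theorem bestF_append_singleton (rs : List (List Char)) (maxd x : List Char) :
    bestF maxd (rs ++ [x]) = if (bestF maxd rs).length < x.length then x else bestF maxd rs := by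
  simp [bestF, List.foldl_append]

theorem bestF_ne_nil {T : List (List Char)} (hNE : ∀ r ∈ T, r ≠ []) (hTe : T ≠ []) :
    bestF [] T ≠ [] := by
  obtain ⟨r0, rest, hTr⟩ := List.exists_cons_of_ne_nil hTe
  have hge := (lem_best_ge T []).2 r0 (by rw [hTr]; simp)
  have h0 : 0 < r0.length := List.length_pos_of_ne_nil (hNE r0 (by rw [hTr]; simp))
  intro hEq
  rw [hEq] at hge; simp at hge; simp [hge] at h0

theorem main_eq (s : String) (hnd : ¬ D_find_longest_digits_substring s) :
    find_longest_digits_substring s = find_longest_digits_substring_alt s := by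
  have hA : find_longest_digits_substring s =
      (if bestF [] (termRuns [] s.toList) = [] then "No digits"
       else String.ofList (bestF [] (termRuns [] s.toList))) := by
    simp [find_longest_digits_substring, lemA]
  have hB0 : pvRunsB s.toList =
      termRuns [] s.toList ++ (if tailRun [] s.toList = [] then [] else [tailRun [] s.toList]) := by
    rw [lemR1, lemE]
  set T := termRuns [] s.toList with hT
  set t := tailRun [] s.toList with ht
  have hNE : ∀ r ∈ T, r ≠ [] := fun r hr => lemNE _ _ r hr
  by_cases htn : t = []
  · have happ : pvRunsB s.toList = T := by rw [hB0, if_pos htn]; simp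
    rcases eq_or_ne T [] with hTe | hTe
    · rw [hA, if_pos (by rw [hTe]; rfl)]
      rw [find_longest_digits_substring_alt, happ, hTe]
      rfl
    · rw [hA, if_neg (bestF_ne_nil hNE hTe)]
      rw [find_longest_digits_substring_alt, happ, lemM' T hNE, if_neg hTe]
  · have htr : t = (s.toList.reverse.takeWhile PySem.Chars.isdigit).reverse := by
      have := lemTL s.toList [] (by simp); simpa using this
    have hpos : 0 < (s.toList.reverse.takeWhile PySem.Chars.isdigit).length := by
      rcases Nat.eq_zero_or_pos (s.toList.reverse.takeWhile PySem.Chars.isdigit).length with h0 | h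
      · exact absurd (by rw [htr, List.eq_nil_of_length_eq_zero h0]; rfl) htn
      · exact h
    have hnd' : ¬ (∀ j, (h : j < s.toList.length) → PySem.Chars.isdigit s.toList[j] = false →
        ((s.toList.take j).reverse.takeWhile PySem.Chars.isdigit).length <
          (s.toList.reverse.takeWhile PySem.Chars.isdigit).length) := by
      intro hall; exact hnd ⟨hpos, hall⟩
    push_neg at hnd'
    obtain ⟨j, hj, hdig, hge⟩ := hnd'
    have hpos' : 0 < (([] ++ s.toList.take j).reverse.takeWhile PySem.Chars.isdigit).length := by
      simpa using lt_of_lt_of_le hpos hge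
    obtain ⟨r, hrT, hrl⟩ := lemN1 s.toList [] (by simp) j hj hdig hpos'
    have htlen : t.length = (s.toList.reverse.takeWhile PySem.Chars.isdigit).length := by
      rw [htr]; simp
    have hrlen : t.length ≤ r.length := by
      rw [hrl, htlen]; simpa using hge
    have hTe : T ≠ [] := by intro h0; rw [← hT, h0] at hrT; simp at hrT
    have hbig : ¬ (bestF [] T).length < t.length := by
      have := (lem_best_ge T []).2 r hrT; omega
    have happ : pvRunsB s.toList = T ++ [t] := by rw [hB0, if_neg htn]
    have hNE2 : ∀ r' ∈ T ++ [t], r' ≠ [] := by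
      intro r' hr'
      rcases List.mem_append.mp hr' with h | h
      · exact hNE r' h
      · rw [List.mem_singleton.mp h]; exact htn
    rw [hA, if_neg (bestF_ne_nil hNE hTe)]
    rw [find_longest_digits_substring_alt, happ, lemM' _ hNE2, if_neg (by simp)]
    rw [bestF_append_singleton, if_neg hbig]

-- ===== VERDICT (by name: the statement is the Claim_ definition above) =====
theorem find_longest_digits_substring_spec : Claim_unchanged_find_longest_digits_substring := by
  intro s _hdom hnd
  exact main_eq s hnd

theorem find_longest_digits_substring_changed : Claim_changed_find_longest_digits_substring := by
  unfold Claim_changed_find_longest_digits_substring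
  refine ⟨by decide, by decide, by decide, ?_, by decide⟩
  simp only [find_longest_digits_substring_alt, lemR1]
  decide

theorem find_longest_digits_substring_tight : Claim_exact_find_longest_digits_substring := by
  intro s _hdom hD
  obtain ⟨hpos, hall⟩ := hD
  have hA : find_longest_digits_substring s =
      (if bestF [] (termRuns [] s.toList) = [] then "No digits"
       else String.ofList (bestF [] (termRuns [] s.toList))) := by
    simp [find_longest_digits_substring, lemA]
  set T := termRuns [] s.toList with hT
  set t := tailRun [] s.toList with ht
  have htr : t = (s.toList.reverse.takeWhile PySem.Chars.isdigit).reverse := by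
    have := lemTL s.toList [] (by simp); simpa using this
  have htlen : t.length = (s.toList.reverse.takeWhile PySem.Chars.isdigit).length := by
    rw [htr]; simp
  have htn : t ≠ [] := by
    intro h0; rw [h0] at htlen; simp at htlen; omega
  have hNE : ∀ r ∈ T, r ≠ [] := fun r hr => lemNE _ _ r hr
  have hlt : ∀ r ∈ T, r.length < t.length := by
    intro r hr
    obtain ⟨j, hj, hdig, hl⟩ := lemN2 s.toList [] (by simp) r hr
    rw [htlen, hl]
    simpa using hall j hj hdig
  -- B returns exactly the trailing run t
  have happ : pvRunsB s.toList = T ++ [t] := by rw [lemR1, lemE, if_neg htn]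
  have hNE2 : ∀ r' ∈ T ++ [t], r' ≠ [] := by
    intro r' hr'
    rcases List.mem_append.mp hr' with h | h
    · exact hNE r' h
    · rw [List.mem_singleton.mp h]; exact htn
  have hbestlt : (bestF [] T).length < t.length := by
    rcases lem_best_mem T [] with h | h
    · rw [h]; simpa using List.length_pos_of_ne_nil htn
    · exact hlt _ h
  have hB : find_longest_digits_substring_alt s = String.ofList t := by
    rw [find_longest_digits_substring_alt, happ, lemM' _ hNE2, if_neg (by simp)]
    rw [bestF_append_singleton, if_pos hbestlt]
  rw [hA, hB]
  have htd : t.all PySem.Chars.isdigit := lemTD s.toList [] (by simp)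
  rcases eq_or_ne (bestF [] T) [] with hb | hb
  · rw [if_pos hb]
    intro hEq
    have : ("No digits").toList = t := by
      rw [show ("No digits" : String) = String.ofList t from hEq]; simp
    have hN : 'N' ∈ t := by rw [← this]; decide
    have := List.all_eq_true.mp htd 'N' hN
    simp [PySem.Chars.isdigit] at this
  · rw [if_neg hb]
    intro hEq
    have : bestF [] T = t := by
      have := congrArg String.toList hEq; simpa using this
    rcases lem_best_mem T [] with h | h
    · exact hb h
    · have hl := hlt _ h; rw [this] at hl; omega
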